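-- pv_equiv track=rewrite | github.com/FazleRabbbiferdaus172/Hill_Climbing_algo | first_choice.py | state_generation
-- ===== SOURCE A (Python) =====
-- def calc_cost(l):
--     la = l
--     cost = 0
--     for i in range(len(la)):
--         l1=l[(i+1) : len(l)]
--         ls = [j for j in l1 if la[i]>j ]
--         cost = cost + len(ls)
--     return cost
--
-- def state_generation(current_state, current_state_cost):
--     min_cost = current_state_cost
--     sli_state = current_state.copy()
--     for i in range(len(current_state)-1):
--         for j in range(i+1,len(current_state)):
--             sli_state[i],sli_state[j] = sli_state[j],sli_state[i]
--             eitar_cost = calc_cost(sli_state)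
--             if(eitar_cost < min_cost):
--                 min_cost = eitar_cost
--                 min_state = sli_state.copy()
--                 return min_state,min_cost
--             sli_state = current_state.copy()
--     return current_state,None
-- ===== SOURCE B (Python) =====
-- def state_generation(current_state, current_state_cost):
--     n = len(current_state)
--     # inversion count of the current state, computed once
--     base = 0
--     for p in range(n):
--         for q in range(p + 1, n):
--             if current_state[p] > current_state[q]:
--                 base += 1
--     for i in range(n - 1):
--         a = current_state[i]
--         for j in range(i + 1, n):
--             b = current_state[j]
--             # incremental inversion delta of swapping positions i and j
--             delta = (1 if b > a else 0) - (1 if a > b else 0)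
--             for k in range(i + 1, j):
--                 c = current_state[k]
--                 delta += (1 if b > c else 0) - (1 if a > c else 0)
--                 delta += (1 if c > a else 0) - (1 if c > b else 0)
--             cost = base + delta
--             if cost < current_state_cost:
--                 new_state = current_state.copy()
--                 new_state[i], new_state[j] = b, a
--                 return new_state, cost
--     return current_state, None
-- ===== Notes on version B (the rewrite author's own statement) =====
-- stated objective: faster
-- what changed: A recounts all inversions of the swapped list from scratch (O(n^2) scan) for every candidate swap; B counts the base inversions of current_state once and computes each swap's inversion change incrementally from only the elements between the two swapped positions.
import Mathlib
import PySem

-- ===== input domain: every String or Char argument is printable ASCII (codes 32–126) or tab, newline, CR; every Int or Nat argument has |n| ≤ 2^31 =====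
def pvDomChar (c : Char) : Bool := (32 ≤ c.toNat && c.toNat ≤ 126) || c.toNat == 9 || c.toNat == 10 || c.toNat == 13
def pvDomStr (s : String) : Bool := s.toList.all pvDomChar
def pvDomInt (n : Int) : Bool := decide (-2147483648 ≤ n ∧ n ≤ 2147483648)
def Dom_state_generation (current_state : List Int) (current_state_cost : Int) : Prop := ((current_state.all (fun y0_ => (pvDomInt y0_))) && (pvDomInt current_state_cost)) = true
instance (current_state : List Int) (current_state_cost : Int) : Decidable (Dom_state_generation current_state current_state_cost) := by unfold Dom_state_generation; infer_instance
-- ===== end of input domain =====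

-- B replaces A's full inversion recount per candidate swap (O(n^2) each, O(n^4) total)
-- by one base inversion count plus an O(j-i) incremental delta per swap (O(n^3) total); objective: faster.

-- ===== PORT A =====
-- all indices below come from Python ranges, hence are in range: pyGetD/pySetD are exact there
def calc_cost (l : List Int) : Int :=
  (PySem.List.pyRange 0 (l.length : Int) 1).foldl (fun cost i =>
    let l1 := PySem.List.slice l (some (i + 1)) (some (l.length : Int))
    let ls := l1.filter (fun j => decide (PySem.List.pyGetD l i 0 > j))
    cost + (ls.length : Int)) 0

-- sli_state[i], sli_state[j] = sli_state[j], sli_state[i] on a fresh copy of cs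
def pySwap (cs : List Int) (i j : Int) : List Int :=
  PySem.List.pySetD (PySem.List.pySetD cs i (PySem.List.pyGetD cs j 0)) j (PySem.List.pyGetD cs i 0)

def sgA_loopJ (cs : List Int) (mc : Int) (i : Int) : List Int → Option (List Int × Int)
  | [] => none
  | j :: rest =>
      let sli := pySwap cs i j
      let e := calc_cost sli
      if e < mc then some (sli, e) else sgA_loopJ cs mc i rest

def sgA_loopI (cs : List Int) (mc : Int) : List Int → Option (List Int × Int)
  | [] => none
  | i :: rest =>
      match sgA_loopJ cs mc i (PySem.List.pyRange (i + 1) (cs.length : Int) 1) with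
      | some r => some r
      | none => sgA_loopI cs mc rest

def state_generation (current_state : List Int) (current_state_cost : Int) : List Int × Option Int :=
  match sgA_loopI current_state current_state_cost
      (PySem.List.pyRange 0 ((current_state.length : Int) - 1) 1) with
  | some (s, e) => (s, some e)
  | none => (current_state, none)

-- ===== PORT B =====
-- base inversion count of current_state, computed once (Source B's first nested loop)
def sgB_base (cs : List Int) : Int :=
  (PySem.List.pyRange 0 (cs.length : Int) 1).foldl (fun acc p =>
    (PySem.List.pyRange (p + 1) (cs.length : Int) 1).foldl (fun acc q =>
      if PySem.List.pyGetD cs p 0 > PySem.List.pyGetD cs q 0 then acc + 1 else acc) acc) 0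

-- incremental inversion delta of swapping positions i and j (Source B's k-loop)
def sgB_delta (cs : List Int) (a b : Int) (i j : Int) : Int :=
  (PySem.List.pyRange (i + 1) j 1).foldl (fun d k =>
    let c := PySem.List.pyGetD cs k 0
    d + ((if b > c then 1 else 0) - (if a > c then 1 else 0))
      + ((if c > a then 1 else 0) - (if c > b then 1 else 0)))
    ((if b > a then (1 : Int) else 0) - (if a > b then 1 else 0))

def sgB_loopJ (cs : List Int) (mc base : Int) (i a : Int) : List Int → Option (List Int × Int)
  | [] => none
  | j :: rest =>
      let b := PySem.List.pyGetD cs j 0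
      let cost := base + sgB_delta cs a b i j
      if cost < mc then
        some (PySem.List.pySetD (PySem.List.pySetD cs i b) j a, cost)
      else sgB_loopJ cs mc base i a rest

def sgB_loopI (cs : List Int) (mc base : Int) : List Int → Option (List Int × Int)
  | [] => none
  | i :: rest =>
      let a := PySem.List.pyGetD cs i 0
      match sgB_loopJ cs mc base i a (PySem.List.pyRange (i + 1) (cs.length : Int) 1) with
      | some r => some r
      | none => sgB_loopI cs mc base rest

def state_generation_alt (current_state : List Int) (current_state_cost : Int) : List Int × Option Int :=
  let base := sgB_base current_state
  match sgB_loopI current_state current_state_cost base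
      (PySem.List.pyRange 0 ((current_state.length : Int) - 1) 1) with
  | some (s, e) => (s, some e)
  | none => (current_state, none)

-- ===== PRECONDITION & SPEC =====
def Spec_state_generation (current_state : List Int) (current_state_cost : Int) (out : List Int × Option Int) : Prop := out = state_generation_alt current_state current_state_cost
instance (current_state : List Int) (current_state_cost : Int) (out : List Int × Option Int) : Decidable (Spec_state_generation current_state current_state_cost out) := by unfold Spec_state_generation; infer_instance

-- ===== CLAIM (what is proved, stated in full; the proofs are below) =====
def Claim_equal_state_generation : Prop := ∀ (current_state : List Int) (current_state_cost : Int), Dom_state_generation current_state current_state_cost → Spec_state_generation current_state current_state_cost (state_generation current_state current_state_cost)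

-- ===== LEMMAS AND PROOFS =====

def cntGT (x : Int) (t : List Int) : Int := ((t.filter (fun y => decide (x > y))).length : Int)
def invc : List Int → Int
  | [] => 0
  | x :: xs => cntGT x xs + invc xs
theorem sum_range_cntGT (l : List Int) :
    ((List.range l.length).map (fun k => cntGT (l.getD k 0) (l.drop (k + 1)))).sum = invc l := by
  induction l with
  | nil => simp [invc]
  | cons x xs ih =>
      rw [List.length_cons, List.range_succ_eq_map, List.map_cons, List.map_map, List.sum_cons]
      simp only [Function.comp_def, Nat.succ_eq_add_one, List.getD_cons_succ, List.drop_succ_cons, List.getD_cons_zero, List.drop_zero]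
      rw [invc, ih]
theorem calc_cost_eq_invc (l : List Int) : calc_cost l = invc l := by
  unfold calc_cost
  rw [PySem.List.foldl_add (g := fun i =>
      (((PySem.List.slice l (some (i + 1)) (some (l.length : Int))).filter
        (fun j => decide (PySem.List.pyGetD l i 0 > j))).length : Int))]
  rw [PySem.List.pyRange_zero_natCast, List.map_map]
  rw [← sum_range_cntGT l]
  rw [zero_add]
  apply congrArg
  apply List.map_congr_left
  intro k hk
  have hk' : k < l.length := List.mem_range.mp hk
  simp only [Function.comp_def, PySem.List.pyGetD_natCast]
  have h1 : ((k : Int) + 1) = ((k + 1 : Nat) : Int) := by push_cast; ring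
  rw [h1, PySem.List.slice_natCast]
  have h2 : (l.drop (k+1)).take (l.length - (k+1)) = l.drop (k+1) := by
    apply List.take_of_length_le; simp
  rw [h2, cntGT]
theorem sgB_base_eq_invc (cs : List Int) : sgB_base cs = invc cs := by
  unfold sgB_base
  have hinner : ∀ p ∈ PySem.List.pyRange 0 (cs.length : Int) 1, ∀ acc : Int,
      (PySem.List.pyRange (p + 1) (cs.length : Int) 1).foldl (fun acc q =>
        if PySem.List.pyGetD cs p 0 > PySem.List.pyGetD cs q 0 then acc + 1 else acc) acc
      = acc + cntGT (cs.getD p.toNat 0) (cs.drop (p.toNat + 1)) := by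
    intro p hp acc
    have hp' := (PySem.List.mem_pyRange_one).mp hp
    have hfold := PySem.List.foldl_pyRange_pyGetD' (a := p + 1) cs 0
      (fun acc c => if PySem.List.pyGetD cs p 0 > c then acc + 1 else acc) acc (by omega)
    simp only [hfold]
    rw [PySem.List.foldl_ite_add_one (p := fun c => PySem.List.pyGetD cs p 0 > c)]
    have : (p + 1).toNat = p.toNat + 1 := by omega
    rw [this]
    rw [PySem.List.pyGetD_of_nonneg cs 0 hp'.1]
    rw [cntGT, List.countP_eq_length_filter]
  rw [PySem.List.foldl_congr_mem' _ _
    (fun acc p => acc + cntGT (cs.getD p.toNat 0) (cs.drop (p.toNat + 1))) _ hinner]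
  have hadd := PySem.List.foldl_add (l := PySem.List.pyRange 0 (cs.length : Int) 1)
    (g := fun p => cntGT (cs.getD p.toNat 0) (cs.drop (p.toNat + 1))) (a := 0)
  simp only [hadd]
  rw [PySem.List.pyRange_zero_natCast, List.map_map, zero_add, ← sum_range_cntGT cs]
  apply congrArg
  apply List.map_congr_left
  intro k hk
  simp
def cntLT (x : Int) (t : List Int) : Int := ((t.filter (fun y => decide (y > x))).length : Int)
def crossL : List Int → List Int → Int
  | [], _ => 0
  | x :: u, v => cntGT x v + crossL u v
theorem cntGT_cons (x y : Int) (t : List Int) :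
    cntGT x (y :: t) = (if x > y then 1 else 0) + cntGT x t := by
  simp only [cntGT, List.filter_cons]
  split <;> simp_all <;> omega
theorem cntLT_cons (x y : Int) (t : List Int) :
    cntLT x (y :: t) = (if y > x then 1 else 0) + cntLT x t := by
  simp only [cntLT, List.filter_cons]
  split <;> simp_all <;> omega
theorem cntGT_append (x : Int) (s t : List Int) :
    cntGT x (s ++ t) = cntGT x s + cntGT x t := by
  simp [cntGT, List.filter_append]
theorem crossL_append_right (u v w : List Int) :
    crossL u (v ++ w) = crossL u v + crossL u w := by
  induction u with
  | nil => simp [crossL]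
  | cons x u ih => simp [crossL, cntGT_append, ih]; ring
theorem crossL_cons_right (u : List Int) (y : Int) (v : List Int) :
    crossL u (y :: v) = cntLT y u + crossL u v := by
  induction u with
  | nil => simp [crossL, cntLT]
  | cons x u ih => rw [crossL, cntGT_cons, ih, crossL, cntLT_cons]; ring
theorem invc_append (u v : List Int) :
    invc (u ++ v) = invc u + crossL u v + invc v := by
  induction u with
  | nil => simp [invc, crossL]
  | cons x u ih => rw [List.cons_append, invc, cntGT_append, ih, invc, crossL]; ring

theorem invc_swap (u m v : List Int) (a b : Int) :
    invc (u ++ b :: (m ++ a :: v))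
      = invc (u ++ a :: (m ++ b :: v))
        + (((if b > a then 1 else 0) - (if a > b then 1 else 0))
           + (cntGT b m - cntGT a m + (cntLT a m - cntLT b m))) := by
  have expand : ∀ x y : Int,
      invc (u ++ x :: (m ++ y :: v))
        = invc u + (cntLT x u + (crossL u m + (cntLT y u + crossL u v)))
          + (cntGT x m + (if x > y then 1 else 0) + cntGT x v
             + (invc m + (cntLT y m + crossL m v) + (cntGT y v + invc v))) := by
    intro x y
    simp only [invc_append, crossL_cons_right, crossL_append_right,
      cntGT_append, cntGT_cons, invc]
    ring
  rw [expand, expand]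
  split_ifs <;> ring_nf
theorem map_pyGetD_subrange (l : List Int) : ∀ (n a : Nat), a + n ≤ l.length →
    (PySem.List.pyRange (a : Int) ((a + n : Nat) : Int) 1).map (fun k => PySem.List.pyGetD l k 0)
      = (l.drop a).take n := by
  intro n
  induction n with
  | zero => intro a h; simp [PySem.List.pyRange_one_eq_nil]
  | succ n ih =>
      intro a h
      have hc : (a : Int) < ((a + (n+1) : Nat) : Int) := by push_cast; omega
      rw [PySem.List.pyRange_one_cons hc, List.map_cons]
      have h1 : ((a : Int) + 1) = ((a + 1 : Nat) : Int) := by push_cast; ring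
      have h2 : ((a + (n+1) : Nat) : Int) = (((a + 1) + n : Nat) : Int) := by push_cast; ring
      have ha : a < l.length := by omega
      have h3 : (l.drop a).take (n + 1) = l[a] :: (l.drop (a + 1)).take n := by
        rw [List.drop_eq_getElem_cons ha, List.take_succ_cons]
      rw [h3, h1, h2, ih (a + 1) (by omega)]
      congr 1
      rw [PySem.List.pyGetD_of_nonneg l 0 (by positivity)]
      simp [ha]
theorem delta_sum (a b : Int) (m : List Int) :
    (m.map (fun c => ((if b > c then (1 : Int) else 0) - (if a > c then 1 else 0))
      + ((if c > a then 1 else 0) - (if c > b then 1 else 0)))).sum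
      = cntGT b m - cntGT a m + (cntLT a m - cntLT b m) := by
  induction m with
  | nil => simp [cntGT, cntLT]
  | cons c m ih =>
      rw [List.map_cons, List.sum_cons, ih, cntGT_cons, cntGT_cons, cntLT_cons, cntLT_cons]
      split_ifs <;> omega
theorem set_at_len {α : Type} (u : List α) (x v : α) (t : List α) :
    (u ++ x :: t).set u.length v = u ++ v :: t := by
  induction u with
  | nil => simp
  | cons y u ih => simp [List.set_cons_succ, ih]

theorem cost_eq (cs : List Int) (i j : Int) (hi : 0 ≤ i) (hij : i < j) (hj : j < (cs.length : Int)) :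
    calc_cost (pySwap cs i j)
      = sgB_base cs + sgB_delta cs (PySem.List.pyGetD cs i 0) (PySem.List.pyGetD cs j 0) i j := by
  obtain ⟨i', rfl⟩ : ∃ i' : Nat, i = (i' : Int) := ⟨i.toNat, (Int.toNat_of_nonneg hi).symm⟩
  obtain ⟨j', rfl⟩ : ∃ j' : Nat, j = (j' : Int) := ⟨j.toNat, (Int.toNat_of_nonneg (by omega)).symm⟩
  have hij' : i' < j' := by exact_mod_cast hij
  have hjn : j' < cs.length := by exact_mod_cast hj
  have hin : i' < cs.length := Nat.lt_trans hij' hjn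
  set A := cs[i'] with hA
  set B := cs[j'] with hB
  set u := cs.take i' with hu
  set m := (cs.drop (i' + 1)).take (j' - (i' + 1)) with hm
  set v := cs.drop (j' + 1) with hv
  have ha : PySem.List.pyGetD cs (i' : Int) 0 = A := by
    rw [hA, PySem.List.pyGetD_of_nonneg cs 0 (by positivity)]
    simp [hin]
  have hb : PySem.List.pyGetD cs (j' : Int) 0 = B := by
    rw [hB, PySem.List.pyGetD_of_nonneg cs 0 (by positivity)]
    simp [hjn]
  have hdd : (cs.drop (i' + 1)).drop (j' - (i' + 1)) = cs.drop j' := by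
    rw [List.drop_drop]; congr 1; omega
  have hdecomp : cs = u ++ A :: (m ++ B :: v) := by
    rw [hA, hB]
    conv_lhs => rw [← List.take_append_drop i' cs]
    rw [List.drop_eq_getElem_cons hin]
    congr 2
    conv_lhs => rw [← List.take_append_drop (j' - (i' + 1)) (cs.drop (i' + 1))]
    rw [hdd, List.drop_eq_getElem_cons hjn, ← hm, ← hv]
  have hulen : u.length = i' := by
    rw [hu, List.length_take]; omega
  have hmlen : m.length = j' - (i' + 1) := by
    rw [hm, List.length_take, List.length_drop]; omega
  have hswap : pySwap cs (i' : Int) (j' : Int) = u ++ B :: (m ++ A :: v) := by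
    unfold pySwap
    rw [ha, hb, PySem.List.pySetD_of_nonneg _ _ (by positivity), PySem.List.pySetD_of_nonneg _ _ (by positivity)]
    rw [Int.toNat_natCast, Int.toNat_natCast]
    conv_lhs => rw [hdecomp]
    rw [← hulen, set_at_len]
    have hassoc : u ++ B :: (m ++ B :: v) = (u ++ B :: m) ++ B :: v := by simp
    rw [hassoc]
    have hlen2 : (u ++ B :: m).length = j' := by simp [hulen, hmlen]; omega
    rw [← hlen2, set_at_len]
    simp
  have hdelta : sgB_delta cs A B (i' : Int) (j' : Int)
      = ((if B > A then 1 else 0) - (if A > B then 1 else 0))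
        + (cntGT B m - cntGT A m + (cntLT A m - cntLT B m)) := by
    unfold sgB_delta
    have hcong := PySem.List.foldl_congr_mem'
      (l := PySem.List.pyRange ((i' : Int) + 1) (j' : Int) 1)
      (f := fun d k =>
        let c := PySem.List.pyGetD cs k 0
        d + ((if B > c then 1 else 0) - (if A > c then 1 else 0))
          + ((if c > A then 1 else 0) - (if c > B then 1 else 0)))
      (g := fun d k => d + (((if B > PySem.List.pyGetD cs k 0 then (1:Int) else 0) - (if A > PySem.List.pyGetD cs k 0 then 1 else 0))
          + ((if PySem.List.pyGetD cs k 0 > A then 1 else 0) - (if PySem.List.pyGetD cs k 0 > B then 1 else 0))))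
      ((if B > A then 1 else 0) - (if A > B then 1 else 0))
      (fun x hx acc => by ring)
    rw [hcong]
    have hadd := PySem.List.foldl_add (l := PySem.List.pyRange ((i' : Int) + 1) (j' : Int) 1)
      (g := fun k => (((if B > PySem.List.pyGetD cs k 0 then (1:Int) else 0) - (if A > PySem.List.pyGetD cs k 0 then 1 else 0))
          + ((if PySem.List.pyGetD cs k 0 > A then 1 else 0) - (if PySem.List.pyGetD cs k 0 > B then 1 else 0))))
      ((if B > A then 1 else 0) - (if A > B then 1 else 0))
    simp only [hadd]
    congr 1
    have hmap : (PySem.List.pyRange ((i' : Int) + 1) (j' : Int) 1).map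
        (fun k => PySem.List.pyGetD cs k 0) = m := by
      have h1 : ((i' : Int) + 1) = ((i' + 1 : Nat) : Int) := by push_cast; ring
      have h2 : ((j' : Nat) : Int) = (((i' + 1) + (j' - (i' + 1)) : Nat) : Int) := by push_cast; omega
      rw [h1, h2, map_pyGetD_subrange cs (j' - (i' + 1)) (i' + 1) (by omega)]
    rw [← hmap, ← delta_sum, List.map_map]
    simp [Function.comp_def]
  rw [ha, hb, hswap, calc_cost_eq_invc, hdelta, sgB_base_eq_invc]
  rw [congrArg invc hdecomp]
  exact invc_swap u m v A B

theorem loopJ_eq (cs : List Int) (mc i : Int) (hi : 0 ≤ i) :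
    ∀ js : List Int, (∀ j ∈ js, i < j ∧ j < (cs.length : Int)) →
    sgA_loopJ cs mc i js = sgB_loopJ cs mc (sgB_base cs) i (PySem.List.pyGetD cs i 0) js := by
  intro js hjs
  induction js with
  | nil => rfl
  | cons j rest ih =>
      obtain ⟨hij, hjn⟩ := hjs j (by simp)
      simp only [sgA_loopJ, sgB_loopJ]
      rw [cost_eq cs i j hi hij hjn]
      by_cases h : sgB_base cs + sgB_delta cs (PySem.List.pyGetD cs i 0) (PySem.List.pyGetD cs j 0) i j < mc
      · simp [h, pySwap]
      · simp only [h, if_false]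
        exact ih (fun x hx => hjs x (by simp [hx]))

theorem loopI_eq (cs : List Int) (mc : Int) :
    ∀ is_ : List Int, (∀ i ∈ is_, 0 ≤ i ∧ i < (cs.length : Int)) →
    sgA_loopI cs mc is_ = sgB_loopI cs mc (sgB_base cs) is_ := by
  intro is_ his
  induction is_ with
  | nil => rfl
  | cons i rest ih =>
      obtain ⟨hi, _⟩ := his i (by simp)
      simp only [sgA_loopI, sgB_loopI]
      rw [loopJ_eq cs mc i hi _ (fun j hj => by
        have := (PySem.List.mem_pyRange_one).mp hj
        exact ⟨by omega, this.2⟩)]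
      cases sgB_loopJ cs mc (sgB_base cs) i (PySem.List.pyGetD cs i 0)
          (PySem.List.pyRange (i + 1) (cs.length : Int) 1) with
      | some r => rfl
      | none => exact ih (fun x hx => his x (by simp [hx]))

-- ===== VERDICT (by name: the statement is the Claim_ definition above) =====
theorem state_generation_spec : Claim_equal_state_generation := by
  intro cs mc _
  unfold Spec_state_generation state_generation state_generation_alt
  rw [loopI_eq cs mc _ (fun i hi => by
    have := (PySem.List.mem_pyRange_one).mp hi
    exact ⟨this.1, by omega⟩)]
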